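-- pv_equiv track=rewrite | github.com/zrnorth/zz-rune | python/runemaker.py | merge_all_common_runesets
-- ===== SOURCE A (Python) =====
-- def merge_all_common_runesets(champRoleRunesList):
--     """
--     Given a list of form [(ChampRole, [RunesShorthand])], consolidates the common sets
--     and returns a list of for [( ( [ChampRole1, ChampRole2, ...], [RunesShorthand] )]
--     """
--     dict = {}
--     for champRole, runesShorthand in champRoleRunesList:
--         key = ", ".join(runesShorthand)
--
--         if key in dict: # Collision! combine the values.
--             newScore = dict[key][0] + 1
--             champRoleList = dict[key][1]
--             champRoleList.append(champRole)
--
--             dict[key] = (newScore, champRoleList)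
--         else: # New key, so add to the dict
--             dict[key] = (1, [champRole])
--
--     return dict
-- ===== SOURCE B (Python) =====
-- def merge_all_common_runesets(champRoleRunesList):
--     """
--     No accumulation at all: pair each champRole with its joined runeset key once,
--     list the distinct keys in first-occurrence order, then build each group's
--     members by a filter pass over the keyed list.
--     """
--     keyed = [(", ".join(runes), champRole) for champRole, runes in champRoleRunesList]
--     result = {}
--     for key in dict.fromkeys(k for k, _ in keyed):
--         members = [champRole for k, champRole in keyed if k == key]
--         result[key] = (len(members), members)
--     return result
-- ===== Notes on version B (the rewrite author's own statement) =====
-- stated objective: alternative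
-- what changed: Replaced A's single-pass dict accumulation (branch on key collision, running (score, list) values) with a no-accumulator staged scheme: pair each champRole with its joined key once, dedup the keys in first-occurrence order, then build each group's member list by a filter pass over the keyed list; trades A's O(n) hash accumulation for one filter pass per distinct key.
import Mathlib
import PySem

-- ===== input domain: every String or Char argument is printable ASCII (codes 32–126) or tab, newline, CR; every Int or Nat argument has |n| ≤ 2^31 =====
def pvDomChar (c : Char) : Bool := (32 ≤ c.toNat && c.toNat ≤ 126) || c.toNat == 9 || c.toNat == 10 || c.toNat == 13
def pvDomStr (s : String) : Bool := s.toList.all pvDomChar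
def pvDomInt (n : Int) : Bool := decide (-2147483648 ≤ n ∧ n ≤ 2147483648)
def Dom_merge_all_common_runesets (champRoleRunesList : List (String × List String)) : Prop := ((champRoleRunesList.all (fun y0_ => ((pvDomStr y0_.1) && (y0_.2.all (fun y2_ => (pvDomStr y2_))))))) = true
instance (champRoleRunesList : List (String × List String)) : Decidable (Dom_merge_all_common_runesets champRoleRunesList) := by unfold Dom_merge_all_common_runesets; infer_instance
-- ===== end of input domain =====

-- B drops A's incremental dict accumulation entirely: it lists the distinct keys first,
-- then builds each group by a filter pass over the input (objective: alternative, not faster).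

-- ===== PORT A =====
-- the loop body of A: one dict update per (champRole, runesShorthand) pair
def pvStepA (d : PySem.Dict String (Int × List String)) (cr : String × List String) :
    PySem.Dict String (Int × List String) :=
  let key := PySem.Str.join ", " cr.2
  if d.contains key then
    -- dict[key]; the default is unreachable, guarded by the contains test
    let v := (d.get? key).getD (0, [])
    d.insert key (v.1 + 1, v.2 ++ [cr.1])
  else
    d.insert key (1, [cr.1])

def merge_all_common_runesets (champRoleRunesList : List (String × List String)) :
    List (String × Int × List String) :=
  (champRoleRunesList.foldl pvStepA PySem.Dict.empty).items

-- ===== PORT B =====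
def merge_all_common_runesets_alt (champRoleRunesList : List (String × List String)) :
    List (String × Int × List String) :=
  -- keyed = [(", ".join(runes), champRole) for champRole, runes in champRoleRunesList]
  let keyed := champRoleRunesList.map (fun cr => (PySem.Str.join ", " cr.2, cr.1))
  -- dict.fromkeys(k for k, _ in keyed) iterated = the distinct keys in first-occurrence order
  (PySem.Set.ofList (keyed.map (·.1))).map (fun key =>
    -- members = [champRole for k, champRole in keyed if k == key]
    let members := (keyed.filter (fun kc => kc.1 == key)).map (·.2)
    (key, (members.length : Int), members))

-- ===== PRECONDITION & SPEC =====
def Spec_merge_all_common_runesets (champRoleRunesList : List (String × List String)) (out : List (String × Int × List String)) : Prop := out = merge_all_common_runesets_alt champRoleRunesList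
instance (champRoleRunesList : List (String × List String)) (out : List (String × Int × List String)) : Decidable (Spec_merge_all_common_runesets champRoleRunesList out) := by unfold Spec_merge_all_common_runesets; infer_instance

-- ===== CLAIM (what is proved, stated in full; the proofs are below) =====
def Claim_equal_merge_all_common_runesets : Prop := ∀ (champRoleRunesList : List (String × List String)), Dom_merge_all_common_runesets champRoleRunesList → Spec_merge_all_common_runesets champRoleRunesList (merge_all_common_runesets champRoleRunesList)

-- ===== LEMMAS AND PROOFS =====

-- the grouping key of an item
def pvKey (p : String × List String) : String := PySem.Str.join ", " p.2

-- first-occurrence deduplication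
def pvFdedup : List String → List String
  | [] => []
  | k :: ks => k :: pvFdedup (ks.filter (fun k' => k' != k))
termination_by l => l.length
decreasing_by simp; exact List.length_filter_le _ _

-- the items of l whose key is k
def pvGroup (l : List (String × List String)) (k : String) : List (String × List String) :=
  l.filter (fun p => pvKey p == k)

-- common characterisation of both results
def pvSpec (l : List (String × List String)) : List (String × Int × List String) :=
  (pvFdedup (l.map pvKey)).map
    (fun k => (k, ((pvGroup l k).length : Int), (pvGroup l k).map (·.1)))

theorem pvMem_fdedup (a : String) (ks : List String) : a ∈ pvFdedup ks ↔ a ∈ ks := by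
  induction ks using pvFdedup.induct with
  | case1 => simp [pvFdedup]
  | case2 k ks ih =>
    simp only [List.unattach_filter, List.unattach_attach] at ih
    rw [pvFdedup]
    by_cases hak : a = k
    · simp [hak]
    · simp [hak, ih, List.mem_filter]

theorem pvFdedup_nodup (ks : List String) : (pvFdedup ks).Nodup := by
  induction ks using pvFdedup.induct with
  | case1 => simp [pvFdedup]
  | case2 k ks ih =>
    simp only [List.unattach_filter, List.unattach_attach] at ih
    rw [pvFdedup]
    refine List.nodup_cons.mpr ⟨?_, ih⟩
    rw [pvMem_fdedup]
    simp [List.mem_filter]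

theorem pvFdedup_append (ks : List String) (k : String) :
    pvFdedup (ks ++ [k]) = if k ∈ ks then pvFdedup ks else pvFdedup ks ++ [k] := by
  induction ks using pvFdedup.induct with
  | case1 => simp [pvFdedup]
  | case2 a ks ih =>
    simp only [List.unattach_filter, List.unattach_attach] at ih
    rw [List.cons_append, pvFdedup, List.filter_append]
    by_cases hka : k = a
    · subst hka
      simp [pvFdedup]
    · have h1 : List.filter (fun k' => k' != a) [k] = [k] := by simp [hka]
      rw [h1, ih]
      by_cases hk : k ∈ ks
      · simp [pvFdedup, hka, hk, List.mem_filter]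
      · simp [pvFdedup, hka, hk, List.mem_filter]

theorem pvFilter_and_right {α : Type} (p q : α → Bool) (l : List α)
    (h : ∀ x, p x = true → q x = true) :
    l.filter (fun x => p x && q x) = l.filter p := by
  induction l with
  | nil => rfl
  | cons x l ih =>
    by_cases hp : p x = true
    · simp [hp, h x hp, ih]
    · have hp' : p x = false := by simpa using hp
      simp [hp', ih]

theorem pvGroup_append_self (l : List (String × List String)) (x : String × List String) :
    pvGroup (l ++ [x]) (pvKey x) = pvGroup l (pvKey x) ++ [x] := by
  simp [pvGroup, List.filter_append]

theorem pvGroup_append_ne (k : String) (l : List (String × List String))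
    (x : String × List String) (h : k ≠ pvKey x) :
    pvGroup (l ++ [x]) k = pvGroup l k := by
  have hb : (pvKey x == k) = false := beq_eq_false_iff_ne.mpr (Ne.symm h)
  simp [pvGroup, List.filter_append, hb]

theorem pvGroup_eq_nil (k : String) (l : List (String × List String))
    (h : k ∉ l.map pvKey) : pvGroup l k = [] := by
  refine List.filter_eq_nil_iff.mpr ?_
  intro p hp hpk
  exact h (List.mem_map.mpr ⟨p, hp, by simpa using hpk⟩)

theorem pvOfList_filter (p : String → Bool) (ks : List String) :
    (PySem.Set.ofList ks).filter p = PySem.Set.ofList (ks.filter p) := by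
  induction ks with
  | nil => rfl
  | cons k ks ih =>
    rw [PySem.Set.ofList_cons, List.filter_cons]
    by_cases hpk : p k = true
    · rw [List.filter_cons, hpk, if_pos rfl, if_pos rfl, PySem.Set.ofList_cons]
      show k :: List.filter p ((PySem.Set.ofList ks).filter (fun y => !(y == k)))
          = k :: (PySem.Set.ofList (ks.filter p)).filter (fun y => !(y == k))
      rw [← ih, List.filter_comm]
    · have hpk' : p k = false := by simpa using hpk
      rw [List.filter_cons, hpk', if_neg (by simp), if_neg (by simp), ← ih]
      show List.filter p ((PySem.Set.ofList ks).filter (fun y => !(y == k)))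
          = List.filter p (PySem.Set.ofList ks)
      rw [List.filter_filter]
      refine pvFilter_and_right p (fun y => !(y == k)) _ ?_
      intro y hy
      by_cases hyk : y = k
      · rw [hyk, hpk'] at hy; cases hy
      · simpa using hyk

theorem pvOfList_eq_fdedup (ks : List String) : PySem.Set.ofList ks = pvFdedup ks := by
  induction ks using pvFdedup.induct with
  | case1 => rw [pvFdedup]; rfl
  | case2 k ks ih =>
    simp only [List.unattach_filter, List.unattach_attach] at ih
    rw [PySem.Set.ofList_cons, pvFdedup]
    congr 1
    show (PySem.Set.ofList ks).filter (fun y => !(y == k)) = pvFdedup (ks.filter (fun k' => k' != k))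
    rw [pvOfList_filter]
    exact ih

theorem pvFilter_map {α β : Type} (f : α → β) (p : β → Bool) (l : List α) :
    (l.map f).filter p = (l.filter (fun x => p (f x))).map f := by
  induction l with
  | nil => rfl
  | cons x l ih =>
    simp only [List.map_cons, List.filter_cons, ih]
    by_cases hp : p (f x) = true <;> simp [hp]

theorem pvAlt_eq_spec (l : List (String × List String)) :
    merge_all_common_runesets_alt l = pvSpec l := by
  rw [merge_all_common_runesets_alt, pvSpec]
  rw [show (l.map (fun cr => (PySem.Str.join ", " cr.2, cr.1))).map (·.1) = l.map pvKey
        from by rw [List.map_map]; rfl,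
      pvOfList_eq_fdedup]
  refine List.map_congr_left ?_
  intro k _
  rw [pvFilter_map (fun cr : String × List String => (PySem.Str.join ", " cr.2, cr.1))
        (fun kc => kc.1 == k) l, List.map_map]
  simp only [List.length_map]
  rfl

theorem pvA_eq_spec (l : List (String × List String)) :
    (l.foldl pvStepA PySem.Dict.empty).items = pvSpec l := by
  induction l using List.reverseRecOn with
  | nil =>
    rw [List.foldl_nil, pvSpec, List.map_nil, pvFdedup]
    rfl
  | append_singleton l x ih =>
    rw [List.foldl_append, List.foldl_cons, List.foldl_nil]
    set d := l.foldl pvStepA PySem.Dict.empty with hdct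
    have hkeys : d.keys = pvFdedup (l.map pvKey) := by
      simp only [PySem.Dict.keys, ih, pvSpec, List.map_map]
      exact (List.map_congr_left fun a _ => rfl).trans (List.map_id _)
    have hnd : d.keys.Nodup := hkeys ▸ pvFdedup_nodup _
    have hcont : d.contains (pvKey x) = decide (pvKey x ∈ l.map pvKey) := by
      rw [PySem.Dict.contains_eq_decide_mem_keys, hkeys]
      exact decide_eq_decide.mpr (pvMem_fdedup _ _)
    by_cases hmem : pvKey x ∈ l.map pvKey
    · -- existing key: in-place update of the entry
      have hcont' : d.contains (pvKey x) = true := by rw [hcont]; simpa using hmem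
      have hget : d.get? (pvKey x)
          = some (((pvGroup l (pvKey x)).length : Int), (pvGroup l (pvKey x)).map (·.1)) := by
        refine PySem.Dict.get?_of_mem_items d ?_ hnd
        rw [ih, pvSpec]
        exact List.mem_map_of_mem ((pvMem_fdedup _ _).mpr hmem)
      have hstep : pvStepA d x
          = d.insert (pvKey x)
              (((pvGroup l (pvKey x)).length : Int) + 1,
               (pvGroup l (pvKey x)).map (·.1) ++ [x.1]) := by
        simp only [pvStepA]
        rw [show PySem.Str.join ", " x.2 = pvKey x from rfl, hcont', hget]
        simp
      rw [hstep, PySem.Dict.items_insert_of_contains d _ hcont', ih]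
      rw [pvSpec, pvSpec, List.map_append, List.map_map]
      have hfd : pvFdedup (l.map pvKey ++ List.map pvKey [x])
          = pvFdedup (l.map pvKey) := by
        rw [List.map_singleton, pvFdedup_append, if_pos hmem]
      rw [hfd]
      refine List.map_congr_left ?_
      intro k' hk'
      by_cases hk'x : k' = pvKey x
      · subst hk'x
        have hx : pvGroup (l ++ [x]) (pvKey x) = pvGroup l (pvKey x) ++ [x] := pvGroup_append_self l x
        simp [Function.comp, hx, List.length_append]
      · have hx : pvGroup (l ++ [x]) k' = pvGroup l k' := pvGroup_append_ne k' l x hk'x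
        have hne : (k' == pvKey x) = false := beq_eq_false_iff_ne.mpr hk'x
        simp [Function.comp, hne, hx]
    · -- new key: the entry is appended
      have hcont' : d.contains (pvKey x) = false := by rw [hcont]; simpa using hmem
      have hstep : pvStepA d x = d.insert (pvKey x) ((1 : Int), [x.1]) := by
        simp only [pvStepA]
        rw [show PySem.Str.join ", " x.2 = pvKey x from rfl, hcont']
        simp
      rw [hstep, PySem.Dict.items_insert_of_not_contains d _ hcont', ih]
      rw [pvSpec, pvSpec, List.map_append]
      have hfd : pvFdedup (l.map pvKey ++ List.map pvKey [x])
          = pvFdedup (l.map pvKey) ++ [pvKey x] := by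
        rw [List.map_singleton, pvFdedup_append, if_neg hmem]
      rw [hfd, List.map_append]
      congr 1
      · refine List.map_congr_left ?_
        intro k' hk'
        have hk'x : k' ≠ pvKey x := by
          intro h
          exact hmem (h ▸ (pvMem_fdedup _ _).mp hk')
        rw [pvGroup_append_ne k' l x hk'x]
      · have hnil : pvGroup l (pvKey x) = [] := pvGroup_eq_nil _ _ hmem
        have hx : pvGroup (l ++ [x]) (pvKey x) = [x] := by
          rw [pvGroup_append_self, hnil, List.nil_append]
        simp [hx]

-- ===== VERDICT (by name: the statement is the Claim_ definition above) =====
theorem merge_all_common_runesets_spec : Claim_equal_merge_all_common_runesets := by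
  intro l _
  unfold Spec_merge_all_common_runesets merge_all_common_runesets
  rw [pvA_eq_spec, pvAlt_eq_spec]
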